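-- pv_equiv track=rewrite | github.com/alexandraback/datacollection | solutions_5631989306621952_0/Python/titusnicolae/test.py | f
-- ===== SOURCE A (Python) =====
-- def maxs(s):
--   ret = s[0]
--   iret = 0
--   for i, e in enumerate(s):
--     if ord(e) > ord(ret):
--       ret = e
--       iret = i
--   return iret
--
-- def f(s):
--   s = s[::-1]
--   build = ''
--   other = ''
--   while(s):
--     build+=s[maxs(s)]
--     other+=s[:maxs(s)]
--     s = s[maxs(s)+1:]
--   return  build+other[::-1]
-- ===== SOURCE B (Python) =====
-- def f(s):
--     # One right-to-left suffix-maximum pass over reversed input, done as a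
--     # single left-to-right scan of s with a running maximum.
--     build = []
--     tail = []
--     m = ''
--     for c in s:
--         if c >= m:
--             m = c
--             build.append(c)
--         else:
--             tail.append(c)
--     build.reverse()
--     return ''.join(build) + ''.join(tail)
-- ===== Notes on version B (the rewrite author's own statement) =====
-- stated objective: faster
-- what changed: Replaced the quadratic loop that repeatedly rescans the shrinking string for its leftmost maximum (calling maxs three times per round and slicing) by a single linear scan of s with a running maximum that classifies each character into build or tail.
import Mathlib
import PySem

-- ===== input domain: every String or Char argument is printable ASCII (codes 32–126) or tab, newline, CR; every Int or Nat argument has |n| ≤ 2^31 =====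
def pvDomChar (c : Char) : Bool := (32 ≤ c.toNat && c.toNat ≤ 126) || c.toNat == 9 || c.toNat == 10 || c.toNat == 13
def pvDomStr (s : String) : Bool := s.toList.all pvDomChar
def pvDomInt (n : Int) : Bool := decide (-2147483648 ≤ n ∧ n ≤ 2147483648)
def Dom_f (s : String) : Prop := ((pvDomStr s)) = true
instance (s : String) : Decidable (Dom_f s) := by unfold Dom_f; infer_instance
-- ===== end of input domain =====

-- B replaces A's quadratic repeated leftmost-maximum rescans of the shrinking
-- reversed string by one linear scan with a running maximum (objective: faster).


-- ===== PORT A =====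
-- maxs's loop `for i, e in enumerate(s): if ord(e) > ord(ret): ret, iret = e, i`
def maxsGo (l : List Char) (ret : Char) (iret : Nat) (i : Nat) : Nat :=
  match l with
  | [] => iret
  | e :: l' => if ret < e then maxsGo l' e i (i + 1) else maxsGo l' ret iret (i + 1)

-- maxs(s): ret = s[0]; iret = 0; loop over enumerate(s) (only called on nonempty s)
def maxs (l : List Char) : Nat :=
  match l with
  | [] => 0
  | c :: _ => maxsGo l c 0 0

-- the while loop of f; `s[maxs(s)]` is always in range (maxs returns a valid
-- index of its nonempty argument), so List.getD never takes its default here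
def fLoop (t : List Char) (build other : List Char) : List Char × List Char :=
  match h : t with
  | [] => (build, other)
  | _ :: _ =>
      fLoop (t.drop (maxs t + 1)) (build ++ [t.getD (maxs t) ' ']) (other ++ t.take (maxs t))
termination_by t.length
decreasing_by subst h; simp

def f (s : String) : String :=
  let t := s.toList.reverse            -- s = s[::-1]
  String.ofList ((fLoop t [] []).1 ++ (fLoop t [] []).2.reverse)   -- build + other[::-1]

-- ===== PORT B =====
-- Source B's loop body: c >= m keeps c in build and updates m, else c goes to tail
def stepB (acc : Char × List Char × List Char) (c : Char) : Char × List Char × List Char :=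
  match acc with
  | (m, build, tail) => if m ≤ c then (c, build ++ [c], tail) else (m, build, tail ++ [c])

def f_alt (s : String) : String :=
  let r := s.toList.foldl stepB (Char.ofNat 0, [], [])   -- m = ''
  String.ofList (r.2.1.reverse ++ r.2.2)   -- build.reverse(); ''.join(build) + ''.join(tail)

-- ===== PRECONDITION & SPEC =====
def Spec_f (s : String) (out : String) : Prop := out = f_alt s
instance (s : String) (out : String) : Decidable (Spec_f s out) := by unfold Spec_f; infer_instance

-- ===== CLAIM (what is proved, stated in full; the proofs are below) =====
def Claim_equal_f : Prop := ∀ (s : String), Dom_f s → Spec_f s (f s)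

-- ===== LEMMAS AND PROOFS =====

-- first index of the maximum of l (0 on [])
def fim (l : List Char) : Nat :=
  match l with
  | [] => 0
  | e :: l' => if ∀ x ∈ l', x ≤ e then 0 else fim l' + 1

-- reference one-pass: (running max from the right, build chars, other chars), both in t-order
def specGo (l : List Char) : Char × List Char × List Char :=
  match l with
  | [] => (Char.ofNat 0, [], [])
  | c :: rest =>
      let (m, b, o) := specGo rest
      if m ≤ c then (c, c :: b, o) else (m, b, c :: o)

theorem char0_le (c : Char) : Char.ofNat 0 ≤ c := by
  show (Char.ofNat 0).val ≤ c.val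
  exact Nat.zero_le _

theorem not_ball_exists {l : List Char} {c : Char} (h : ¬ ∀ x ∈ l, x ≤ c) :
    ∃ x ∈ l, c < x := by
  push_neg at h
  exact h

theorem maxsGo_of_all_le (l : List Char) : ∀ ret iret i, (∀ x ∈ l, x ≤ ret) → maxsGo l ret iret i = iret := by
  induction l with
  | nil => intro ret iret i _; rfl
  | cons e l' ih =>
      intro ret iret i h
      have he : ¬ ret < e := not_lt.mpr (h e (by simp))
      simp only [maxsGo, if_neg he]
      exact ih ret iret (i+1) (fun x hx => h x (by simp [hx]))

theorem maxsGo_first_max (l : List Char) : ∀ ret iret i, (∃ x ∈ l, ret < x) → maxsGo l ret iret i = i + fim l := by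
  induction l with
  | nil => intro ret iret i h; simp at h
  | cons e l' ih =>
      intro ret iret i h
      by_cases hre : ret < e
      · simp only [maxsGo, if_pos hre]
        by_cases hall : ∀ x ∈ l', x ≤ e
        · rw [maxsGo_of_all_le l' e i (i+1) hall]
          simp only [fim, if_pos hall]
          omega
        · rw [ih e i (i+1) (not_ball_exists hall)]
          simp only [fim, if_neg hall]
          omega
      · -- e ≤ ret, so the witness is in l' and exceeds e too
        have her : e ≤ ret := not_lt.mp hre
        obtain ⟨x, hx, hrx⟩ := h
        have hx' : x ∈ l' := by
          rcases List.mem_cons.mp hx with h1 | h1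
          · exact absurd (h1 ▸ hrx) (not_lt.mpr her)
          · exact h1
        have hexe : ¬ ∀ y ∈ l', y ≤ e := by
          intro hall
          exact absurd (lt_of_le_of_lt her hrx) (not_lt.mpr (hall x hx'))
        simp only [maxsGo, if_neg hre]
        rw [ih ret iret (i+1) ⟨x, hx', hrx⟩]
        simp only [fim, if_neg hexe]
        omega

theorem maxs_eq_fim (l : List Char) : maxs l = fim l := by
  cases l with
  | nil => rfl
  | cons c l' =>
      simp only [maxs, maxsGo, if_neg (lt_irrefl c)]
      by_cases hall : ∀ x ∈ l', x ≤ c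
      · rw [maxsGo_of_all_le l' c 0 1 hall]
        simp only [fim, if_pos hall]
      · rw [maxsGo_first_max l' c 0 1 (not_ball_exists hall)]
        simp only [fim, if_neg hall]
        omega

theorem specGo_max (l : List Char) : ∀ x ∈ l, x ≤ (specGo l).1 := by
  induction l with
  | nil => simp
  | cons c rest ih =>
      intro x hx
      simp only [specGo]
      rcases List.mem_cons.mp hx with h1 | h1
      · subst h1
        by_cases hm : (specGo rest).1 ≤ x
        · simp [hm]
        · simp [hm]; exact le_of_lt (not_le.mp hm)
      · by_cases hm : (specGo rest).1 ≤ c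
        · simp [hm]; exact le_trans (ih x h1) hm
        · simp [hm]; exact ih x h1

theorem specGo_fst_mem (l : List Char) : (specGo l).1 = Char.ofNat 0 ∨ (specGo l).1 ∈ l := by
  induction l with
  | nil => exact Or.inl rfl
  | cons a as iha =>
      simp only [specGo]
      by_cases h1 : (specGo as).1 ≤ a
      · simp [h1]
      · simp only [if_neg h1]
        rcases iha with h2 | h2
        · exact Or.inl h2
        · exact Or.inr (List.mem_cons_of_mem a h2)

-- splitting specGo at the first maximum reproduces one round of A's loop
theorem specGo_split (l : List Char) (hne : l ≠ []) :
    (specGo l).2.1 = l.getD (maxs l) ' ' :: (specGo (l.drop (maxs l + 1))).2.1 ∧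
    (specGo l).2.2 = l.take (maxs l) ++ (specGo (l.drop (maxs l + 1))).2.2 := by
  induction l with
  | nil => exact absurd rfl hne
  | cons c rest ih =>
      rw [maxs_eq_fim]
      by_cases hall : ∀ x ∈ rest, x ≤ c
      · have hm : (specGo rest).1 ≤ c := by
          rcases specGo_fst_mem rest with h0 | hmem
          · rw [h0]; exact char0_le c
          · exact hall _ hmem
        simp only [fim, if_pos hall]
        simp [specGo, hm]
      · obtain ⟨x, hx, hcx⟩ := not_ball_exists hall
        have hm : ¬ (specGo rest).1 ≤ c :=
          not_le.mpr (lt_of_lt_of_le hcx (specGo_max rest x hx))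
        obtain ⟨ihb, iho⟩ := ih (List.ne_nil_of_mem hx)
        rw [maxs_eq_fim] at ihb iho
        simp only [fim, if_neg hall]
        constructor
        · simp only [specGo, if_neg hm]
          simpa using ihb
        · simp only [specGo, if_neg hm]
          simp only [List.take_succ_cons, List.drop_succ_cons]
          rw [iho]
          simp

-- A's loop with accumulators computes specGo's pair
theorem fLoop_spec : ∀ n (t : List Char), t.length = n → ∀ build other,
    fLoop t build other = (build ++ (specGo t).2.1, other ++ (specGo t).2.2) := by
  intro n
  induction n using Nat.strong_induction_on with
  | _ n ih =>
      intro t ht build other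
      subst ht
      cases t with
      | nil => rw [fLoop.eq_def]; simp [specGo]
      | cons c rest =>
          rw [fLoop.eq_def]
          simp only []
          have hlen : ((c :: rest).drop (maxs (c :: rest) + 1)).length < (c :: rest).length := by
            simp
          rw [ih _ hlen _ rfl]
          obtain ⟨hb, ho⟩ := specGo_split (c :: rest) (by simp)
          rw [hb, ho]
          simp

-- B's fold over the reverse computes specGo with both output lists reversed
theorem foldl_stepB (t : List Char) :
    t.reverse.foldl stepB (Char.ofNat 0, [], []) =
      ((specGo t).1, (specGo t).2.1.reverse, (specGo t).2.2.reverse) := by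
  induction t with
  | nil => rfl
  | cons c rest ih =>
      simp only [List.reverse_cons, List.foldl_append, ih, List.foldl_cons, List.foldl_nil]
      simp only [specGo, stepB]
      by_cases hm : (specGo rest).1 ≤ c
      · simp [hm]
      · simp [hm]

-- ===== VERDICT (by name: the statement is the Claim_ definition above) =====
theorem f_spec : Claim_equal_f := by
  intro s _
  unfold Spec_f f f_alt
  have hfold := foldl_stepB (s.toList.reverse)
  rw [List.reverse_reverse] at hfold
  simp only [hfold]
  rw [fLoop_spec (s.toList.reverse.length) (s.toList.reverse) rfl [] []]
  simp
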